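-- pv_equiv track=rewrite | github.com/Dibyas83/masai | coding/leetcode/,akenon_overlapping.py | remove_overlapping
-- ===== SOURCE A (Python) =====
-- def remove_overlapping(intervals: list[list[int]]) -> int:
--     intervals.sort()
--     res = 0 # no of removals
--     prev_end = intervals[0][1]  # starting pairs 2nd element
--     for start, end in intervals[1:]:
--         if start >= prev_end:
--             prev_end = end # update prev for next matching
--         else: # if overlapped
--             res += 1
--             prev_end = min(end,prev_end)
--     return  res
-- ===== SOURCE B (Python) =====
-- def remove_overlapping(intervals: list[list[int]]) -> int:
--     # DP alternative: answer = n - length of longest non-overlapping chain.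
--     # (sorts `intervals` in place, like the original)
--     intervals.sort()
--     chains = []  # (start, longest chain beginning at that suffix position)
--     for s, e in reversed(intervals):
--         d = 1 + max([d2 for s2, d2 in chains if s2 >= e], default=0)
--         chains = [(s, d)] + chains
--     return len(intervals) - max(d for _, d in chains)
-- ===== Notes on version B (the rewrite author's own statement) =====
-- stated objective: alternative
-- what changed: A's single left-to-right greedy scan that tracks the running minimum end is replaced by a dynamic program over suffixes that computes the longest non-overlapping chain and returns n minus its length.
-- outside the precondition, e.g. on remove_overlapping([[0, 1, 2]]): A returns 0, B raises ValueError
import Mathlib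
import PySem

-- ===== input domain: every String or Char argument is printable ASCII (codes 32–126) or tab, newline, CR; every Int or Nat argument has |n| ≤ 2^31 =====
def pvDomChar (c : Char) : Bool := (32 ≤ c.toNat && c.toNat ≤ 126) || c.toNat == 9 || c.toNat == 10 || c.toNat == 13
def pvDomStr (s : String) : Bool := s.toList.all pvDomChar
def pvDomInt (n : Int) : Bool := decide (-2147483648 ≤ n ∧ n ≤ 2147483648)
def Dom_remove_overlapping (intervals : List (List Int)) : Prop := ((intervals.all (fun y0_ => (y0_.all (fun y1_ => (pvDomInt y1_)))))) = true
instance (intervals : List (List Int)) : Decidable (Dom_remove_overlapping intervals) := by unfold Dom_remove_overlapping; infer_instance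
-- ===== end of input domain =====

-- B replaces A's greedy min-end scan by a longest-chain DP (answer = n - longest non-overlapping
-- chain): an alternative algorithm, not faster. Both Pythons sort `intervals` in place (the same
-- observable mutation); the equality proved here is about the return value.

-- ===== PORT A =====
-- Python's list.sort() on list[list[int]] is lexicographic; the explicit instances below are
-- definitionally Lean's lexicographic order on List Int (both ports sort the same way).
def pySortIV (xs : List (List Int)) : List (List Int) :=
  @PySem.List.sorted (List Int) (List Int) List.instLinearOrder.toLT LinearOrder.toDecidableLT xs (fun x => x) false

def remove_overlapping (intervals : List (List Int)) : Int :=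
  let l := pySortIV intervals
  let pe0 := PySem.List.pyGetD (PySem.List.pyGetD l 0 []) 1 0  -- intervals[0][1]; out of range excluded by Pre_
  ((PySem.List.slice l (some 1) none).foldl
    (fun st iv =>
      let s := PySem.List.pyGetD iv 0 0   -- unpacking 'start, end'; rows of length ≠ 2 excluded by Pre_
      let e := PySem.List.pyGetD iv 1 0
      if st.2 ≤ s then (st.1, e) else (st.1 + 1, min e st.2))
    ((0 : Int), pe0)).1

-- ===== PORT B =====
def remove_overlapping_alt (intervals : List (List Int)) : Int :=
  let l := pySortIV intervals
  -- 'for s, e in reversed(intervals): ... chains = [(s, d + 1)] + chains' is a right fold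
  let chains := l.foldr
    (fun iv c =>
      let s := PySem.List.pyGetD iv 0 0   -- unpacking 's, e'; rows of length ≠ 2 excluded by Pre_
      let e := PySem.List.pyGetD iv 1 0
      let d := c.foldl (fun d q => if e ≤ q.1 ∧ d < q.2 then q.2 else d) 0
      (s, d + 1) :: c) []
  let best := chains.foldl (fun b q => if b < q.2 then q.2 else b) 0
  (l.length : Int) - best

-- ===== PRECONDITION & SPEC =====
-- Pre_ excludes the empty list (A raises IndexError) and lists with a row of length ≠ 2, on which
-- A's tuple unpacking raises ValueError/IndexError -- except that a lone over-long row that sorts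
-- lexicographically first is never unpacked, so A accidentally still returns there (see cites).
def Pre_remove_overlapping (intervals : List (List Int)) : Prop :=
  intervals ≠ [] ∧ ∀ iv ∈ intervals, iv.length = 2
instance (intervals : List (List Int)) : Decidable (Pre_remove_overlapping intervals) := by
  unfold Pre_remove_overlapping; infer_instance
def pvWitness_remove_overlapping : List (List Int) := [[1, 3], [2, 4], [0, 1]]

def Spec_remove_overlapping (intervals : List (List Int)) (out : Int) : Prop :=
  out = remove_overlapping_alt intervals
instance (intervals : List (List Int)) (out : Int) : Decidable (Spec_remove_overlapping intervals out) := by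
  unfold Spec_remove_overlapping; infer_instance

-- ===== CLAIM (what is proved, stated in full; the proofs are below) =====
def Claim_equal_remove_overlapping : Prop := ∀ (intervals : List (List Int)),
  Dom_remove_overlapping intervals → Pre_remove_overlapping intervals →
  Spec_remove_overlapping intervals (remove_overlapping intervals)

-- ===== LEMMAS AND PROOFS =====

theorem pySortIV_pairwise (xs : List (List Int)) : (pySortIV xs).Pairwise (fun a b => a ≤ b) :=
  PySem.List.sorted_pairwise xs _

theorem pySortIV_perm (xs : List (List Int)) : (pySortIV xs).Perm xs :=
  @PySem.List.sorted_perm (List Int) (List Int) List.instLinearOrder.toLT LinearOrder.toDecidableLT xs (fun x => x) false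

-- the two components Python unpacks from a row
def toPair (iv : List Int) : Int × Int := (PySem.List.pyGetD iv 0 0, PySem.List.pyGetD iv 1 0)

-- length of the longest non-overlapping chain (subsequence) of t whose first start is >= pe
def pvChain (pe : Int) : List (Int × Int) → Int
  | [] => 0
  | p :: t => if pe ≤ p.1 then max (1 + pvChain p.2 t) (pvChain pe t) else pvChain pe t

def pvChainBest : List (Int × Int) → Int
  | [] => 0
  | p :: t => max (1 + pvChain p.2 t) (pvChainBest t)

def pvKept (pe : Int) : List (Int × Int) → Int
  | [] => 0
  | p :: t => if pe ≤ p.1 then 1 + pvKept p.2 t else pvKept (min p.2 pe) t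

def pvDp : List (Int × Int) → List (Int × Int)
  | [] => []
  | p :: t =>
    let c := pvDp t
    (p.1, (c.foldl (fun d q => if p.2 ≤ q.1 ∧ d < q.2 then q.2 else d) 0) + 1) :: c

theorem pvChain_nonneg (t : List (Int × Int)) (pe : Int) : 0 ≤ pvChain pe t := by
  induction t generalizing pe with
  | nil => simp [pvChain]
  | cons p t ih =>
    simp only [pvChain]
    have h1 := ih p.2; have h2 := ih pe
    split_ifs <;> omega

theorem pvChainBest_nonneg (t : List (Int × Int)) : 0 ≤ pvChainBest t := by
  cases t with
  | nil => simp [pvChainBest]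
  | cons p t => simp only [pvChainBest]; have := pvChain_nonneg t p.2; omega

theorem pvChain_min (t : List (Int × Int)) (a b : Int) :
    pvChain (min a b) t = max (pvChain a t) (pvChain b t) := by
  induction t generalizing a b with
  | nil => simp [pvChain]
  | cons p t ih =>
    simp only [pvChain]
    have h := ih a b
    split_ifs <;> omega

theorem pvChain_allGe (t : List (Int × Int)) (pe : Int) (h : ∀ p ∈ t, pe ≤ p.1) :
    pvChain pe t = pvChainBest t := by
  induction t with
  | nil => simp [pvChain, pvChainBest]
  | cons p t ih =>
    have hp : pe ≤ p.1 := h p (by simp)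
    simp only [pvChain, pvChainBest, if_pos hp]
    rw [ih (fun q hq => h q (by simp [hq]))]

theorem pvKept_eq (t : List (Int × Int)) (hs : t.Pairwise (fun p q => p.1 ≤ q.1)) (pe : Int) :
    pvKept pe t = max (pvChain pe t) (pvChainBest t - 1) := by
  induction t generalizing pe with
  | nil => simp [pvKept, pvChain, pvChainBest]
  | cons p t ih =>
    rw [List.pairwise_cons] at hs
    simp only [pvKept, pvChain, pvChainBest]
    by_cases hc : pe ≤ p.1
    · rw [if_pos hc, if_pos hc, ih hs.2 p.2,
        pvChain_allGe t pe (fun q hq => le_trans hc (hs.1 q hq))]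
      omega
    · rw [if_neg hc, if_neg hc, ih hs.2 (min p.2 pe), pvChain_min t p.2 pe]
      omega

theorem pvDp_run (t : List (Int × Int)) : ∀ (e acc : Int), 0 ≤ acc →
    (pvDp t).foldl (fun d q => if e ≤ q.1 ∧ d < q.2 then q.2 else d) acc
      = max acc (pvChain e t) := by
  induction t with
  | nil => intro e acc hacc; simp [pvDp, pvChain]; omega
  | cons p t ih =>
    intro e acc hacc
    simp only [pvDp, List.foldl_cons]
    have hd : (pvDp t).foldl (fun d q => if p.2 ≤ q.1 ∧ d < q.2 then q.2 else d) 0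
        = pvChain p.2 t := by
      rw [ih p.2 0 le_rfl]
      have := pvChain_nonneg t p.2
      omega
    rw [hd]
    have hnn : 0 ≤ pvChain p.2 t := pvChain_nonneg t p.2
    rw [ih e _ (by split_ifs <;> omega)]
    simp only [pvChain]
    split_ifs <;> omega

theorem pvDp_best (t : List (Int × Int)) : ∀ (acc : Int), 0 ≤ acc →
    (pvDp t).foldl (fun b q => if b < q.2 then q.2 else b) acc = max acc (pvChainBest t) := by
  induction t with
  | nil => intro acc hacc; simp [pvDp, pvChainBest]; omega
  | cons p t ih =>
    intro acc hacc
    simp only [pvDp, List.foldl_cons]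
    have hd : (pvDp t).foldl (fun d q => if p.2 ≤ q.1 ∧ d < q.2 then q.2 else d) 0
        = pvChain p.2 t := by
      rw [pvDp_run t p.2 0 le_rfl]
      have := pvChain_nonneg t p.2
      omega
    rw [hd]
    have hnn : 0 ≤ pvChain p.2 t := pvChain_nonneg t p.2
    rw [ih _ (by split_ifs <;> omega)]
    simp only [pvChainBest]
    split_ifs <;> omega

theorem pvScanA (t : List (Int × Int)) (res pe : Int) :
    ((t.foldl (fun st p => if st.2 ≤ p.1 then (st.1, p.2) else (st.1 + 1, min p.2 st.2))
      (res, pe)).1) = res + t.length - pvKept pe t := by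
  induction t generalizing res pe with
  | nil => simp [pvKept]
  | cons p t ih =>
    simp only [List.foldl_cons, pvKept]
    by_cases hc : pe ≤ p.1
    · rw [if_pos hc, if_pos hc, ih]
      simp only [List.length_cons]
      push_cast
      omega
    · rw [if_neg hc, if_neg hc, ih]
      simp only [List.length_cons]
      push_cast
      omega

theorem lexHead (a b : List Int) (ha : a.length = 2) (hb : b.length = 2) (h : a ≤ b) :
    (toPair a).1 ≤ (toPair b).1 := by
  obtain ⟨x1, x2, rfl⟩ := List.length_eq_two.mp ha
  obtain ⟨y1, y2, rfl⟩ := List.length_eq_two.mp hb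
  simp only [toPair, PySem.List.pyGetD_zero_cons]
  by_contra hx
  rw [not_le] at hx
  have : ([y1, y2] : List Int) < [x1, x2] := by
    rw [List.cons_lt_cons_iff]; left; exact hx
  exact absurd this (not_lt.mpr h)

theorem foldrB (l : List (List Int)) :
    (l.foldr (fun iv c =>
      (PySem.List.pyGetD iv 0 0,
        (c.foldl (fun d q => if PySem.List.pyGetD iv 1 0 ≤ q.1 ∧ d < q.2 then q.2 else d) 0) + 1)
      :: c) []) = pvDp (l.map toPair) := by
  induction l with
  | nil => rfl
  | cons iv l ih => simp only [List.foldr_cons, List.map_cons, pvDp, ih]; rfl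

theorem portEq (intervals : List (List Int))
    (hne : intervals ≠ []) (hlen : ∀ iv ∈ intervals, iv.length = 2) :
    (let l := pySortIV intervals
     let pe0 := PySem.List.pyGetD (PySem.List.pyGetD l 0 []) 1 0
     ((PySem.List.slice l (some 1) none).foldl
       (fun st iv =>
         let s := PySem.List.pyGetD iv 0 0
         let e := PySem.List.pyGetD iv 1 0
         if st.2 ≤ s then (st.1, e) else (st.1 + 1, min e st.2))
       ((0 : Int), pe0)).1)
    =
    (let l := pySortIV intervals
     let chains := l.foldr
       (fun iv c =>
         let s := PySem.List.pyGetD iv 0 0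
         let e := PySem.List.pyGetD iv 1 0
         let d := c.foldl (fun d q => if e ≤ q.1 ∧ d < q.2 then q.2 else d) 0
         (s, d + 1) :: c) []
     let best := chains.foldl (fun b q => if b < q.2 then q.2 else b) 0
     (l.length : Int) - best) := by
  have hl2 : ∀ iv ∈ pySortIV intervals, iv.length = 2 :=
    fun iv hiv => hlen iv ((pySortIV_perm intervals).subset hiv)
  have hlne : pySortIV intervals ≠ [] := by
    intro hc
    have := (pySortIV_perm intervals).length_eq
    rw [hc] at this
    exact hne (List.length_eq_zero_iff.mp this.symm)
  obtain ⟨h0, tl, hl⟩ : ∃ h0 tl, pySortIV intervals = h0 :: tl := by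
    cases hx : pySortIV intervals with
    | nil => exact absurd hx hlne
    | cons a b => exact ⟨a, b, rfl⟩
  have hpw : ((pySortIV intervals).map toPair).Pairwise (fun p q => p.1 ≤ q.1) := by
    rw [List.pairwise_map]
    exact (pySortIV_pairwise intervals).imp_of_mem
      (fun {a b} ha hb hr => lexHead a b (hl2 a ha) (hl2 b hb) hr)
  rw [hl] at hpw ⊢
  simp only
  rw [PySem.List.pyGetD_zero_cons, PySem.List.slice_from_one, List.tail_cons, foldrB]
  rw [show (tl.foldl (fun st iv =>
        let s := PySem.List.pyGetD iv 0 0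
        let e := PySem.List.pyGetD iv 1 0
        if st.2 ≤ s then (st.1, e) else (st.1 + 1, min e st.2))
      ((0 : Int), PySem.List.pyGetD h0 1 0))
      = (tl.map toPair).foldl
        (fun st p => if st.2 ≤ p.1 then (st.1, p.2) else (st.1 + 1, min p.2 st.2))
        ((0 : Int), PySem.List.pyGetD h0 1 0) from (List.foldl_map (f := toPair)
        (g := fun st p => if st.2 ≤ p.1 then (st.1, p.2) else (st.1 + 1, min p.2 st.2))
        (l := tl) (init := ((0 : Int), PySem.List.pyGetD h0 1 0))).symm]
  rw [pvScanA, List.map_cons, pvDp_best _ 0 le_rfl]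
  rw [List.map_cons, List.pairwise_cons] at hpw
  rw [show PySem.List.pyGetD h0 1 0 = (toPair h0).2 from rfl, pvKept_eq _ hpw.2]
  have h1 : 0 ≤ pvChainBest (toPair h0 :: tl.map toPair) := pvChainBest_nonneg _
  simp only [pvChainBest] at h1 ⊢
  have hlen2 : ((tl.map toPair).length : Int) = tl.length := by simp
  have := pvChain_nonneg (tl.map toPair) (toPair h0).2
  simp only [List.length_cons]
  push_cast
  omega

-- ===== VERDICT (by name: the statement is the Claim_ definition above) =====
theorem remove_overlapping_spec : Claim_equal_remove_overlapping := by
  intro intervals _ hpre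
  unfold Spec_remove_overlapping remove_overlapping remove_overlapping_alt
  exact portEq intervals hpre.1 hpre.2
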